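-- pv_equiv track=rewrite | github.com/minh-liem/rosalind | py/grph.py | overlap_graphs
-- ===== SOURCE A (Python) =====
-- def overlap_graphs(sequences):
--     name_list = list(sequences[i][0] for i in range(len(sequences)))
--     seq_list = list(sequences[i][1] for i in range(len(sequences)))
--     edges = []
--
--     for s in seq_list:
--         for t in seq_list:
--             if t != s:
--                 if s[-3:] == t[0:3]:
--                     edges.append((name_list[seq_list.index(s)], name_list[seq_list.index(t)]))
--
--     edges_str = '\n'.join(f"{x} {y}" for x, y in edges)
--
--     return edges_str
-- ===== SOURCE B (Python) =====
-- def overlap_graphs(sequences):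
--     # name of the FIRST occurrence of each distinct sequence string
--     first_name = {}
--     for name, seq in sequences:
--         if seq not in first_name:
--             first_name[seq] = name
--     # index sequences by their 3-letter prefix (one pass)
--     by_prefix = {}
--     for _, seq in sequences:
--         by_prefix.setdefault(seq[:3], []).append(seq)
--     lines = []
--     for _, s in sequences:
--         for t in by_prefix.get(s[-3:], []):
--             if t != s:
--                 lines.append(f"{first_name[s]} {first_name[t]}")
--     return '\n'.join(lines)
-- ===== Notes on version B (the rewrite author's own statement) =====
-- stated objective: faster
-- what changed: Replaced the quadratic pair scan with repeated list.index lookups by a one-pass first-occurrence name dict and a hash index of sequences keyed on their 3-letter prefix, so each sequence only visits its matching bucket.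
import Mathlib
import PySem

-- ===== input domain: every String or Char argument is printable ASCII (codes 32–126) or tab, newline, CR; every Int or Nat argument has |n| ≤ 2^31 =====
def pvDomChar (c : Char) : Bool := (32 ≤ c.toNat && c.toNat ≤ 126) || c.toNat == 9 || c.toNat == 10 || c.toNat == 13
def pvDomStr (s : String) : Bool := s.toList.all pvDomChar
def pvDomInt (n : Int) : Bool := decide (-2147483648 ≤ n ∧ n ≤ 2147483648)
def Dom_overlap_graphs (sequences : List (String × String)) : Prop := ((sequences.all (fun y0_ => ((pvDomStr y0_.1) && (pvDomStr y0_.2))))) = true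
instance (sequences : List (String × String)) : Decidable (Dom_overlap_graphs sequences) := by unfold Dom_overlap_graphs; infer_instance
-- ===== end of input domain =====

-- B replaces A's triple scan (pair loop + list.index lookups) by a first-occurrence name dict and a
-- prefix-3 index built in one pass each; return values proved equal on every input.

-- ===== PORT A =====
def overlap_graphs (sequences : List (String × String)) : String :=
  let name_list := (PySem.List.pyRange 0 (sequences.length : Int) 1).map
      (fun i => (PySem.List.pyGetD sequences i ("", "")).1)
  let seq_list := (PySem.List.pyRange 0 (sequences.length : Int) 1).map
      (fun i => (PySem.List.pyGetD sequences i ("", "")).2)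
  let edges := seq_list.foldl (fun edges s =>
      seq_list.foldl (fun edges t =>
        if t ≠ s then
          if PySem.Str.slice s (some (-3)) none = PySem.Str.slice t (some 0) (some 3) then
            edges ++ [((match PySem.List.index? seq_list s with  -- seq_list.index(s): s ∈ seq_list, none unreachable
                         | some k => PySem.List.pyGetD name_list (k : Int) ""
                         | none => ""),
                       (match PySem.List.index? seq_list t with
                         | some k => PySem.List.pyGetD name_list (k : Int) ""
                         | none => ""))]
          else edges
        else edges) edges) []
  PySem.Str.join "\n" (edges.map (fun p => PySem.Str.join " " [p.1, p.2]))

-- ===== PORT B =====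
def overlap_graphs_alt (sequences : List (String × String)) : String :=
  let first_name : PySem.Dict String String :=
    sequences.foldl (fun d p => if d.contains p.2 then d else d.insert p.2 p.1) PySem.Dict.empty
  let by_prefix : PySem.Dict String (List String) :=
    sequences.foldl (fun d p =>
      d.modify (PySem.Str.slice p.2 none (some 3)) [] (fun l => l ++ [p.2])) PySem.Dict.empty
  let lines := sequences.foldl (fun lines p =>
    (by_prefix.getD (PySem.Str.slice p.2 (some (-3)) none) []).foldl (fun lines t =>
      if t ≠ p.2 then
        -- first_name[s]: every sequence string is a key of first_name, KeyError unreachable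
        lines ++ [PySem.Str.join " " [first_name.getD p.2 "", first_name.getD t ""]]
      else lines) lines) []
  PySem.Str.join "\n" lines

-- ===== PRECONDITION & SPEC =====
def Spec_overlap_graphs (sequences : List (String × String)) (out : String) : Prop := out = overlap_graphs_alt sequences
instance (sequences : List (String × String)) (out : String) : Decidable (Spec_overlap_graphs sequences out) := by unfold Spec_overlap_graphs; infer_instance

-- ===== CLAIM (what is proved, stated in full; the proofs are below) =====
def Claim_equal_overlap_graphs : Prop := ∀ (sequences : List (String × String)), Dom_overlap_graphs sequences → Spec_overlap_graphs sequences (overlap_graphs sequences)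

-- ===== LEMMAS AND PROOFS =====

-- the first-occurrence name of sequence string s, as an option-free value
def pvFirstNm (l : List (String × String)) (s : String) : String :=
  ((l.find? (fun p => p.2 == s)).map Prod.fst).getD ""

-- A's name lookup name_list[seq_list.index(s)] is the first-occurrence name
theorem pv_nameA_eq (l : List (String × String)) (s : String) :
    (match PySem.List.index? (l.map Prod.snd) s with
      | some k => PySem.List.pyGetD (l.map Prod.fst) (k : Int) ""
      | none => "") = pvFirstNm l s := by
  induction l with
  | nil => simp [pvFirstNm, PySem.List.index?]
  | cons p l ih =>
    by_cases h : p.2 = s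
    · subst h
      rw [List.map_cons, PySem.List.index?_cons_self]
      simp [pvFirstNm]
    · rw [List.map_cons, PySem.List.index?_cons_of_ne _ (by simpa using h)]
      rcases hk : PySem.List.index? (l.map Prod.snd) s with _ | k
      · rw [hk] at ih
        simpa [pvFirstNm, h] using ih
      · rw [hk] at ih
        simp only [Option.map_some] at ih ⊢
        rw [PySem.List.pyGetD_natCast] at ih
        rw [PySem.List.pyGetD_natCast, List.map_cons, List.getD_cons_succ]
        simpa [pvFirstNm, h] using ih

-- B's first_name dict holds the first-occurrence names
theorem pv_firstDict_get? (l : List (String × String)) (d : PySem.Dict String String) (s : String) :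
    (l.foldl (fun d p => if d.contains p.2 then d else d.insert p.2 p.1) d).get? s
      = (d.get? s).or ((l.find? (fun p => p.2 == s)).map Prod.fst) := by
  induction l generalizing d with
  | nil => simp
  | cons p l ih =>
    rw [List.foldl_cons, ih]
    by_cases hc : d.contains p.2 = true
    · simp only [if_pos hc]
      by_cases h : p.2 = s
      · subst h
        have : (d.get? p.2).isSome := by rw [← PySem.Dict.contains_eq_isSome_get?]; exact hc
        rcases hv : d.get? p.2 with _ | v
        · rw [hv] at this; simp at this
        · simp
      · simp [h]
    · simp only [if_neg hc]
      by_cases h : s = p.2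
      · subst h
        have hnone : d.get? p.2 = none := by
          rcases hv : d.get? p.2 with _ | v
          · rfl
          · exact absurd (by rw [PySem.Dict.contains_eq_isSome_get?, hv]; rfl) hc
        rw [PySem.Dict.get?_insert, if_pos rfl, hnone]
        simp
      · rw [PySem.Dict.get?_insert, if_neg h]
        have h2 : ¬ p.2 = s := fun hh => h hh.symm
        simp [h2]

theorem pv_firstDict_getD (l : List (String × String)) (s : String) :
    (l.foldl (fun d p => if d.contains p.2 then d else d.insert p.2 p.1) PySem.Dict.empty).getD s ""
      = pvFirstNm l s := by
  rw [PySem.Dict.getD_eq_get?_getD, pv_firstDict_get?]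
  simp [pvFirstNm]

-- B's prefix index: bucket k is the sequences whose 3-prefix is k, in order
theorem pv_bucket (l : List (String × String)) (k : String) :
    (l.foldl (fun d p =>
        d.modify (PySem.Str.slice p.2 none (some 3)) [] (fun b => b ++ [p.2])) PySem.Dict.empty).getD k []
      = (l.map Prod.snd).filter (fun t => PySem.Str.slice t none (some 3) == k) := by
  have h1 : l.foldl (fun d p =>
        d.modify (PySem.Str.slice p.2 none (some 3)) [] (fun b => b ++ [p.2])) PySem.Dict.empty
      = (l.map (fun p => (PySem.Str.slice p.2 none (some 3), p.2))).foldl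
          (fun d q => d.modify q.1 [] (fun b => b ++ [q.2])) PySem.Dict.empty := by
    rw [List.foldl_map]
  rw [h1, PySem.Dict.getD_foldl_modify_append, PySem.Dict.getD_empty, List.nil_append,
      List.filter_map, List.map_map]
  rw [List.filter_map]
  rfl

-- name_list / seq_list comprehensions are projections
theorem pv_proj (xs : List (String × String)) (f : String × String → String) :
    (PySem.List.pyRange 0 (xs.length : Int) 1).map
      (fun i => f (PySem.List.pyGetD xs i ("", ""))) = xs.map f := by
  have := PySem.List.map_pyGetD_pyRange_zero' xs ("", "")
  calc (PySem.List.pyRange 0 (xs.length : Int) 1).map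
          (fun i => f (PySem.List.pyGetD xs i ("", "")))
      = ((PySem.List.pyRange 0 (xs.length : Int) 1).map
          (fun i => PySem.List.pyGetD xs i ("", ""))).map f := by rw [List.map_map]; rfl
    _ = xs.map f := by rw [this]

-- ===== VERDICT (by name: the statement is the Claim_ definition above) =====

-- A's nested loop: each outer step appends the filtered, mapped inner matches
theorem pv_outerA {a b : Type} [DecidableEq a] (sl2 : List a) (P : a -> a -> Prop)
    [inst : forall s t, Decidable (P s t)] (g : a -> a -> b) :
    forall (sl : List a) (init : List b),
    sl.foldl (fun acc s => sl2.foldl (fun acc t =>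
        if t ≠ s then (if P s t then acc ++ [g s t] else acc) else acc) acc) init
      = init ++ sl.flatMap (fun s =>
          (sl2.filter (fun t => decide (t ≠ s) && decide (P s t))).map (g s)) := by
  intro sl
  induction sl with
  | nil => intro init; simp
  | cons s sl ih =>
    intro init
    rw [List.foldl_cons]
    have hfun : (fun (acc : List b) t =>
        if t ≠ s then (if P s t then acc ++ [g s t] else acc) else acc)
        = (fun acc t => if (decide (t ≠ s) && decide (P s t)) = true then acc ++ [g s t] else acc) := by
      funext acc t
      by_cases h1 : t = s <;> by_cases h2 : P s t <;> simp [h1, h2]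
    rw [hfun, PySem.List.foldl_append_if, ih, List.flatMap_cons, List.append_assoc]

-- B's nested loop: each outer step appends its bucket's non-self matches
theorem pv_outerB {b : Type} (bk : String -> List String) (h : String -> String -> b) :
    forall (l : List (String × String)) (init : List b),
    l.foldl (fun acc p => (bk p.2).foldl (fun acc t =>
        if t ≠ p.2 then acc ++ [h p.2 t] else acc) acc) init
      = init ++ (l.map Prod.snd).flatMap (fun s =>
          ((bk s).filter (fun t => decide (t ≠ s))).map (h s)) := by
  intro l
  induction l with
  | nil => intro init; simp
  | cons p l ih =>
    intro init
    rw [List.foldl_cons]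
    have hfun : (fun (acc : List b) t => if t ≠ p.2 then acc ++ [h p.2 t] else acc)
        = (fun acc t => if decide (t ≠ p.2) = true then acc ++ [h p.2 t] else acc) := by
      funext acc t; by_cases h1 : t = p.2 <;> simp [h1]
    rw [hfun, PySem.List.foldl_append_if, ih, List.map_cons, List.flatMap_cons, List.append_assoc]

theorem overlap_graphs_spec : Claim_equal_overlap_graphs := by
  intro l _
  unfold Spec_overlap_graphs overlap_graphs overlap_graphs_alt
  simp only [pv_proj, pv_nameA_eq, pv_firstDict_getD, pv_bucket]
  rw [pv_outerA (List.map Prod.snd l)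
        (fun s t => PySem.Str.slice s (some (-3)) none = PySem.Str.slice t (some 0) (some 3))
        (fun s t => (pvFirstNm l s, pvFirstNm l t))]
  rw [pv_outerB
        (fun x => (List.map Prod.snd l).filter
          (fun t => PySem.Str.slice t none (some 3) == PySem.Str.slice x (some (-3)) none))
        (fun s t => PySem.Str.join " " [pvFirstNm l s, pvFirstNm l t])]
  simp only [List.nil_append]
  congr 1
  rw [List.map_flatMap]
  congr 1
  funext s
  rw [List.map_map, List.filter_filter]
  have hcomp : ((fun p : String × String => PySem.Str.join " " [p.1, p.2]) ∘
      fun t => (pvFirstNm l s, pvFirstNm l t))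
      = (fun t => PySem.Str.join " " [pvFirstNm l s, pvFirstNm l t]) := rfl
  rw [hcomp]
  congr 1
  apply List.filter_congr
  intro t _
  have hz : PySem.Str.slice t (some 0) (some 3) = PySem.Str.slice t none (some 3) := by
    have h1 : (PySem.Str.slice t (some 0) (some 3)).toList = (PySem.Str.slice t none (some 3)).toList := by
      simp
    exact String.toList_inj.mp h1
  rw [← hz]
  by_cases h2 : PySem.Str.slice s (some (-3)) none = PySem.Str.slice t (some 0) (some 3)
  · simp [h2]
  · simp [h2, Ne.symm h2]
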